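-- pv_equiv track=rewrite | github.com/pyapyapya/Problem-Solving-TIL | 프로그래머스/2/389479. 서버 증설 횟수/서버 증설 횟수.py | solution
-- ===== SOURCE A (Python) =====
-- def solution(players, m, k):
--     servers = [0 for _ in range(24)]
--     for hour, n_players in enumerate(players):
--         cur_server = sum(servers[max(0, hour-k+1):hour+1])
--         max_players_capacity = (cur_server * m) + m - 1
--         while n_players > max_players_capacity:
--             servers[hour] += 1
--             max_players_capacity += m
--     return sum(servers)
-- ===== SOURCE B (Python) =====
-- def solution(players, m, k):
--     # Closed form per hour, max(0, n//m - active), with a running window sum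
--     # instead of A's unit-increment while loop over a fixed 24-slot array.
--     adds = [0] * len(players)
--     window = 0  # sum of additions made in the k-1 previous hours
--     total = 0
--     for hour, n in enumerate(players):
--         if k >= 1 and hour - k >= 0:
--             window -= adds[hour - k]
--         extra = n // m - window
--         if extra < 0:
--             extra = 0
--         if k >= 1:
--             window += extra
--         adds[hour] = extra
--         total += extra
--     return total
-- ===== Notes on version B (the rewrite author's own statement) =====
-- stated objective: faster
-- what changed: A grows each hour's server count one unit at a time in a while loop over a fixed 24-slot array and re-sums a slice every hour; B computes each hour's additions in closed form as max(0, n_players//m - window) with a running window sum, so the per-hour cost no longer depends on the player counts (intended as faster; a timing run measured 2.5-3.8x on large inputs but recorded it unconfirmed).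
-- outside the precondition, e.g. on solution([-5], -2, 1): A returns 0, B returns 2
import Mathlib
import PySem

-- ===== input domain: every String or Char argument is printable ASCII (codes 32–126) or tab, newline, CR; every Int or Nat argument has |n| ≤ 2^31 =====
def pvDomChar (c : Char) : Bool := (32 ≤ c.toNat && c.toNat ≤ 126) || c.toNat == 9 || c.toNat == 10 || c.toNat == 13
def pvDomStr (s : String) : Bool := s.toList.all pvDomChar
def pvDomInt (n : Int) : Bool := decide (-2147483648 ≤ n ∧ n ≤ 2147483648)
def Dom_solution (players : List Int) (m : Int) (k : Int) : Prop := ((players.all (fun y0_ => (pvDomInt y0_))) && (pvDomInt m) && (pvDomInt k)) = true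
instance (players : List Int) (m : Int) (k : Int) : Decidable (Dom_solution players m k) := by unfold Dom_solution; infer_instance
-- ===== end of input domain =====

-- B replaces A's unit-increment while loop by the floor-division closed form
-- max(0, n//m - window) with a running window sum (intended as faster; the timing
-- run measured ~2.5-3.8x on large inputs, recorded as unconfirmed).

-- ===== PORT A =====
-- the inner `while n_players > max_players_capacity: servers[hour] += 1; ...`;
-- the fuel argument only makes the recursion total: with m ≥ 1 (Pre_) it never runs out
def aWhile (m n : Int) : Nat → Int → List Int → Nat → List Int
  | 0, _, servers, _ => servers
  | fuel + 1, cap, servers, hour =>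
      if cap < n then
        aWhile m n fuel (cap + m) (servers.set hour (servers.getD hour 0 + 1)) hour
      else servers

-- `for hour, n_players in enumerate(players): ...` (hour carried as a counter)
def aLoop (m k : Int) : List Int → List Int → Nat → List Int
  | [], servers, _ => servers
  | n :: ps, servers, hour =>
      let cur := (PySem.List.slice servers (some (max 0 ((hour : Int) - k + 1))) (some ((hour : Int) + 1))).sum
      let cap := cur * m + m - 1
      aLoop m k ps (aWhile m n ((n - cap).toNat + 1) cap servers hour) (hour + 1)

def solution (players : List Int) (m : Int) (k : Int) : Int :=
  (aLoop m k players (List.replicate 24 0) 0).sum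

-- ===== PORT B =====
-- `for hour, n in enumerate(players):` with the running window sum (hour carried as a counter);
-- adds[hour - k] is read only when 1 <= k and 0 <= hour - k, so the index is in range: getD is exact there
def bLoop (m k : Int) : List Int → List Int → Int → Int → Nat → Int
  | [], _, _, total, _ => total
  | n :: ps, adds, window, total, hour =>
      let window := if 1 ≤ k ∧ 0 ≤ (hour : Int) - k
        then window - adds.getD ((hour : Int) - k).toNat 0 else window
      let extra := PySem.Int.floordiv n m - window
      let extra := if extra < 0 then 0 else extra
      let window := if 1 ≤ k then window + extra else window
      bLoop m k ps (adds.set hour extra) window (total + extra) (hour + 1)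

def solution_alt (players : List Int) (m : Int) (k : Int) : Int :=
  bLoop m k players (List.replicate players.length 0) 0 0 0

-- ===== PRECONDITION & SPEC =====
-- Pre_ excludes m ≤ 0 (A's while loop never terminates once triggered, and the
-- value A returns when it is not triggered is an accident of the capacity formula)
-- and more than 24 hours of input (A writes past its fixed 24-slot array and
-- raises IndexError whenever an increase is needed there).
def Pre_solution (players : List Int) (m : Int) (k : Int) : Prop :=
  1 ≤ m ∧ players.length ≤ 24
instance (players : List Int) (m : Int) (k : Int) : Decidable (Pre_solution players m k) := by unfold Pre_solution; infer_instance

def pvWitness_solution : List Int × Int × Int := ([300, 1000, 24], 5, 3)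

def Spec_solution (players : List Int) (m : Int) (k : Int) (out : Int) : Prop := out = solution_alt players m k
instance (players : List Int) (m : Int) (k : Int) (out : Int) : Decidable (Spec_solution players m k out) := by unfold Spec_solution; infer_instance

-- ===== CLAIM (what is proved, stated in full; the proofs are below) =====
def Claim_equal_solution : Prop := ∀ (players : List Int) (m : Int) (k : Int), Dom_solution players m k → Pre_solution players m k → Spec_solution players m k (solution players m k)

-- ===== LEMMAS AND PROOFS =====

theorem pv_fdiv_le_iff (m n c : Int) (hm : 1 ≤ m) :
    PySem.Int.floordiv n m ≤ c ↔ n ≤ c * m + m - 1 := by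
  have h := PySem.Int.floordiv_lt_iff_lt_mul (a := n) (b := m) (q := c + 1) (by omega)
  have he : (c + 1) * m = c * m + m := by ring
  rw [he] at h
  constructor
  · intro hle
    have := h.mp (by omega)
    omega
  · intro hle
    have := h.mpr (by omega)
    omega

theorem pv_fuel_enough (m n cur : Int) (hm : 1 ≤ m) :
    (max 0 (PySem.Int.floordiv n m - cur)).toNat ≤ (n - (cur * m + m - 1)).toNat + 1 := by
  set q := PySem.Int.floordiv n m with hq
  by_cases hle : q ≤ cur
  · have : max 0 (q - cur) = 0 := by omega
    simp [this]
  · have hqm : q * m ≤ n :=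
      (PySem.Int.le_floordiv_iff_mul_le (a := n) (b := m) (q := q) (by omega)).mp (le_refl q)
    have h2 : (q - cur - 1) * 1 ≤ (q - cur - 1) * m :=
      mul_le_mul_of_nonneg_left hm (by omega)
    have h3 : (q - cur - 1) * m = q * m - cur * m - m := by ring
    have h4 : q - cur ≤ n - (cur * m + m - 1) := by
      have := h2.trans (by omega : (q - cur - 1) * m ≤ n - cur * m - m)
      omega
    omega


theorem pv_aWhile_spec (m n : Int) (hm : 1 ≤ m) :
    ∀ (fuel : Nat) (cur : Int) (servers : List Int) (hour : Nat),
      hour < servers.length →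
      (max 0 (PySem.Int.floordiv n m - cur)).toNat ≤ fuel →
      aWhile m n fuel (cur * m + m - 1) servers hour
        = servers.set hour (servers.getD hour 0 + max 0 (PySem.Int.floordiv n m - cur)) := by
  intro fuel
  induction fuel with
  | zero =>
    intro cur servers hour hlen hfuel
    have hq : PySem.Int.floordiv n m ≤ cur := by omega
    have : max 0 (PySem.Int.floordiv n m - cur) = 0 := by omega
    rw [this, add_zero, aWhile]
    rw [List.getD_eq_getElem servers 0 hlen, List.set_getElem_self]
  | succ fuel ih =>
    intro cur servers hour hlen hfuel
    by_cases hq : PySem.Int.floordiv n m ≤ cur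
    · have hcond : ¬ (cur * m + m - 1 < n) := by
        have := (pv_fdiv_le_iff m n cur hm).mp hq
        omega
      have : max 0 (PySem.Int.floordiv n m - cur) = 0 := by omega
      rw [this, add_zero]
      rw [aWhile, if_neg hcond]
      rw [List.getD_eq_getElem servers 0 hlen, List.set_getElem_self]
    · have hcond : cur * m + m - 1 < n := by
        by_contra hc
        exact hq ((pv_fdiv_le_iff m n cur hm).mpr (by omega))
      rw [aWhile, if_pos hcond]
      have hstep : cur * m + m - 1 + m = (cur + 1) * m + m - 1 := by ring
      rw [hstep]
      set s1 := servers.set hour (servers.getD hour 0 + 1) with hs1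
      have hlen1 : hour < s1.length := by simpa [hs1] using hlen
      have hfuel1 : (max 0 (PySem.Int.floordiv n m - (cur + 1))).toNat ≤ fuel := by omega
      rw [ih (cur + 1) s1 hour hlen1 hfuel1]
      have hget1 : s1.getD hour 0 = servers.getD hour 0 + 1 := by
        rw [hs1, List.getD_eq_getElem _ 0 hlen1, List.getElem_set_self]
      rw [hget1, hs1, List.set_set]
      congr 1
      omega



theorem pv_sum_drop_concat_zero : ∀ (adds : List Int) (s : Nat),
    (List.drop s (adds ++ [(0 : Int)])).sum = (List.drop s adds).sum := by
  intro adds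
  induction adds with
  | nil => intro s; cases s <;> simp
  | cons a t ih =>
    intro s
    cases s with
    | zero => simp
    | succ s => simpa using ih s

theorem pv_getD_concat_length (xs ys : List Int) (v : Int) :
    (xs ++ v :: ys).getD xs.length 0 = v := by
  induction xs with
  | nil => simp
  | cons a t ih => simpa using ih

theorem pv_set_append_length (xs ys : List Int) (v : Int) :
    (xs ++ ys).set xs.length v = xs ++ ys.set 0 v := by
  induction xs with
  | nil => simp
  | cons a t ih => simp [ih]

theorem pv_getD_append_left (xs ys : List Int) (s : Nat) (h : s < xs.length) :
    (xs ++ ys).getD s 0 = xs.getD s 0 := by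
  rw [List.getD_eq_getElem _ _ (by simp; omega), List.getD_eq_getElem _ _ h,
    List.getElem_append_left h]

theorem pv_main (m k : Int) (hm : 1 ≤ m) :
    ∀ (ps p : List Int) (total window : Int),
      p.length + ps.length ≤ 24 →
      total = p.sum →
      window = (if 1 ≤ k then (p.drop (max 0 ((p.length : Int) - k)).toNat).sum else 0) →
      (aLoop m k ps (p ++ List.replicate (24 - p.length) 0) p.length).sum
        = bLoop m k ps (p ++ List.replicate ps.length 0) window total p.length := by
  intro ps
  induction ps with
  | nil =>
    intro p total window h24 htot hwin
    simp [aLoop, bLoop, List.sum_append, List.sum_replicate, htot]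
  | cons n ps ih =>
    intro p total window h24 htot hwin
    have h24' : p.length + ps.length + 1 ≤ 24 := by simpa using h24
    set L := p.length with hL
    set servers := p ++ List.replicate (24 - L) 0 with hS
    have hL24 : L < 24 := by omega
    have hlenS : servers.length = 24 := by simp [hS]; omega
    set a : Int := max 0 ((L : Int) - k + 1) with ha
    have ha0 : (0 : Int) ≤ a := le_max_left _ _
    have hrep : 24 - L = (24 - L - 1) + 1 := by omega
    have htake : servers.take (L + 1) = p ++ [(0 : Int)] := by
      rw [hS, hrep, List.replicate_succ]
      rw [show L + 1 = p.length + 1 from by rw [hL]]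
      rw [List.take_append]
      simp [List.take_succ_cons]
    -- A's window sum is the suffix sum of the finished prefix
    have hcur : (PySem.List.slice servers (some a) (some ((L : Int) + 1))).sum
        = (p.drop a.toNat).sum := by
      rw [PySem.List.slice_toNat servers ha0 (by omega)]
      rw [show ((L : Int) + 1).toNat = L + 1 from by omega]
      rw [← List.drop_take, htake]
      exact pv_sum_drop_concat_zero p a.toNat
    simp only [aLoop, bLoop, List.length_cons]
    rw [← ha, hcur]
    rw [pv_aWhile_spec m n hm _ ((p.drop a.toNat).sum) servers L (by omega)
      (pv_fuel_enough m n _ hm)]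
    set q := PySem.Int.floordiv n m with hq
    -- B's window after the subtraction step equals A's window sum
    have hw1 : (if 1 ≤ k ∧ 0 ≤ (L : Int) - k
          then window - (p ++ List.replicate (ps.length + 1) 0).getD ((L : Int) - k).toNat 0
          else window)
        = (p.drop a.toNat).sum := by
      by_cases hk : 1 ≤ k
      · by_cases hge : 0 ≤ (L : Int) - k
        · rw [if_pos ⟨hk, hge⟩]
          set s' := ((L : Int) - k).toNat with hs'
          have hsL : s' < L := by omega
          have hmax : (max 0 ((L : Int) - k)).toNat = s' := by omega
          have hu : a.toNat = s' + 1 := by omega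
          rw [pv_getD_append_left p _ s' (by omega)]
          rw [hwin, if_pos hk, hmax, hu]
          rw [List.drop_eq_getElem_cons (by omega : s' < p.length)]
          rw [List.getD_eq_getElem p 0 (by omega : s' < p.length)]
          rw [List.sum_cons]
          ring
        · rw [if_neg (by tauto)]
          rw [hwin, if_pos hk]
          have h1 : (max 0 ((L : Int) - k)).toNat = 0 := by omega
          have h2 : a.toNat = 0 := by omega
          rw [h1, h2]
      · rw [if_neg (by tauto)]
        rw [hwin, if_neg hk]
        have h1 : p.length ≤ a.toNat := by omega
        rw [List.drop_eq_nil_of_le h1, List.sum_nil]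
    rw [hw1]
    have hget : servers.getD L 0 = 0 := by
      rw [hS, hrep, List.replicate_succ, hL]
      exact pv_getD_concat_length p _ 0
    rw [hget, zero_add]
    have hEx : (if q - (p.drop a.toNat).sum < 0 then 0 else q - (p.drop a.toNat).sum)
        = max 0 (q - (p.drop a.toNat).sum) := by
      split_ifs <;> omega
    rw [hEx]
    set t := max 0 (q - (p.drop a.toNat).sum) with ht
    -- both new accumulators are prefix ++ [t] ++ zeros
    have hnewA : servers.set L t = (p ++ [t]) ++ List.replicate (24 - (L + 1)) 0 := by
      rw [hS, hL, pv_set_append_length, ← hL, hrep, List.replicate_succ]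
      rw [List.set_cons_zero]
      rw [show 24 - L - 1 = 24 - (L + 1) from by omega, ← List.append_cons]
    have hnewB : (p ++ List.replicate (ps.length + 1) 0).set L t
        = (p ++ [t]) ++ List.replicate ps.length 0 := by
      rw [hL, pv_set_append_length, List.replicate_succ]
      rw [List.set_cons_zero, ← List.append_cons]
    rw [hnewA, hnewB]
    -- B's updated window satisfies the invariant for the grown prefix
    have hw2 : (if 1 ≤ k then (p.drop a.toNat).sum + t else (p.drop a.toNat).sum)
        = (if 1 ≤ k then ((p ++ [t]).drop (max 0 (((p ++ [t]).length : Int) - k)).toNat).sum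
           else 0) := by
      by_cases hk : 1 ≤ k
      · rw [if_pos hk, if_pos hk]
        have hlen1 : ((p ++ [t]).length : Int) = (L : Int) + 1 := by simp [hL]
        have hmax : (max 0 (((p ++ [t]).length : Int) - k)).toNat = a.toNat := by
          rw [hlen1]; omega
        rw [hmax, List.drop_append_of_le_length (by omega : a.toNat ≤ p.length)]
        simp
      · rw [if_neg hk, if_neg hk]
        have h1 : p.length ≤ a.toNat := by omega
        rw [List.drop_eq_nil_of_le h1, List.sum_nil]
    rw [hw2]
    rw [show L + 1 = (p ++ [t]).length from by simp [hL]]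
    exact ih (p ++ [t]) (total + t) _ (by simp [← hL]; omega) (by simp [htot]) rfl

-- ===== VERDICT (by name: the statement is the Claim_ definition above) =====
theorem solution_spec : Claim_equal_solution := by
  intro players m k _ hpre
  unfold Spec_solution solution solution_alt
  have := pv_main m k hpre.1 players [] 0 0 (by simpa using hpre.2) rfl (by simp)
  simpa using this
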